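-- pv_equiv track=rewrite | github.com/hareemYashal/James-Phifer-Labs | comprehensive_lab_extractor.py | organize_fields_by_category
-- ===== SOURCE A (Python) =====
-- def organize_fields_by_category(fields):
--     """Organize fields into logical categories for better display."""
--     categories = {
--         'headers': [],
--         'client_info': [],
--         'work_order': [],
--         'sample_data': [],
--         'analysis_requests': [],
--         'hazards': [],
--         'technical': [],
--         'administrative': [],
--         'checkboxes': [],
--         'other': []
--     }
--
--     for field in fields:
--         field_name = field.get('field_name', '').lower()
--         field_type = field.get('type', '').lower()
--
--         # Categorize based on field name and type
--         if any(word in field_name for word in ['title', 'header', 'form', 'revision']):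
--             categories['headers'].append(field)
--         elif any(word in field_name for word in ['client', 'address', 'email', 'phone', 'po', 'project']):
--             categories['client_info'].append(field)
--         elif any(word in field_name for word in ['work order', 'date', 'time', 'year']):
--             categories['work_order'].append(field)
--         elif any(word in field_name for word in ['sample', 'matrix', 'grade', 'container']):
--             categories['sample_data'].append(field)
--         elif any(word in field_name for word in ['analysis', 'parameter', 'preservation']):
--             categories['analysis_requests'].append(field)
--         elif any(word in field_name for word in ['hazard', 'flammable', 'poison', 'irritant']):
--             categories['hazards'].append(field)
--         elif any(word in field_name for word in ['filtered', 'cooled', 'temperature', 'flow']):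
--             categories['technical'].append(field)
--         elif any(word in field_name for word in ['relinquished', 'received', 'initials', 'page']):
--             categories['administrative'].append(field)
--         elif field_type == 'checkbox':
--             categories['checkboxes'].append(field)
--         else:
--             categories['other'].append(field)
--
--     return categories
-- ===== SOURCE B (Python) =====
-- CATEGORY_KEYWORDS = [
--     ('headers', ['title', 'header', 'form', 'revision']),
--     ('client_info', ['client', 'address', 'email', 'phone', 'po', 'project']),
--     ('work_order', ['work order', 'date', 'time', 'year']),
--     ('sample_data', ['sample', 'matrix', 'grade', 'container']),
--     ('analysis_requests', ['analysis', 'parameter', 'preservation']),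
--     ('hazards', ['hazard', 'flammable', 'poison', 'irritant']),
--     ('technical', ['filtered', 'cooled', 'temperature', 'flow']),
--     ('administrative', ['relinquished', 'received', 'initials', 'page']),
-- ]
--
-- ALL_CATEGORIES = [c for c, _ in CATEGORY_KEYWORDS] + ['checkboxes', 'other']
--
--
-- def _classify(field):
--     name = field.get('field_name', '').lower()
--     for cat, words in CATEGORY_KEYWORDS:
--         if any(w in name for w in words):
--             return cat
--     if field.get('type', '').lower() == 'checkbox':
--         return 'checkboxes'
--     return 'other'
--
--
-- def organize_fields_by_category(fields):
--     """Organize fields into logical categories for better display."""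
--     return {cat: [f for f in fields if _classify(f) == cat] for cat in ALL_CATEGORIES}
-- ===== Notes on version B (the rewrite author's own statement) =====
-- stated objective: simpler
-- what changed: Replaces the single-pass nine-branch if/elif ladder mutating a dict of buckets with a declarative keyword table plus a _classify helper, building the result as a per-category filter comprehension (output-driven instead of input-driven).
import Mathlib
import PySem

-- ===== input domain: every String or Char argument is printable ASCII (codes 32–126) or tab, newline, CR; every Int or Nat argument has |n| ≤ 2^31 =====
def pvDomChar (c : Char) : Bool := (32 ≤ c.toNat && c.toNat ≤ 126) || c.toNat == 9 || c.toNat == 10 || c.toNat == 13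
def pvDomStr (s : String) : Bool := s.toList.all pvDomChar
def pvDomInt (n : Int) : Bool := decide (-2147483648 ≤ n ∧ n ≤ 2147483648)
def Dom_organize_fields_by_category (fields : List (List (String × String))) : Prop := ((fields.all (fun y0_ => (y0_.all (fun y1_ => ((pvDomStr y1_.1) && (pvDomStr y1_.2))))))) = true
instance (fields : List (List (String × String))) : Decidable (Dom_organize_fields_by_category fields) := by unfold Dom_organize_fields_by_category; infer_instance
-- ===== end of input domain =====

-- B replaces A's nine-branch if/elif ladder mutating a dict of buckets by a keyword table, a
-- classify helper and one filter per category (output-driven instead of input-driven); same cost.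

-- ===== PORT A =====
-- `field.get('field_name','').lower()` / `field.get('type','').lower()` (used by both ports)
def pvFieldName (field : List (String × String)) : String :=
  PySem.Str.lower ((PySem.Dict.mk field).getD "field_name" "")
def pvFieldType (field : List (String × String)) : String :=
  PySem.Str.lower ((PySem.Dict.mk field).getD "type" "")

-- the dict literal with its ten empty buckets, in source order
def orgInit : PySem.Dict String (List (List (String × String))) :=
  PySem.Dict.mk [("headers", []), ("client_info", []), ("work_order", []), ("sample_data", []),
    ("analysis_requests", []), ("hazards", []), ("technical", []), ("administrative", []),
    ("checkboxes", []), ("other", [])]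

-- one iteration of A's `for field in fields` loop body (the if/elif ladder)
def orgStep (cats : PySem.Dict String (List (List (String × String))))
    (field : List (String × String)) : PySem.Dict String (List (List (String × String))) :=
  if ["title", "header", "form", "revision"].any (fun w => PySem.Str.isIn w (pvFieldName field)) then
    cats.modify "headers" [] (· ++ [field])
  else if ["client", "address", "email", "phone", "po", "project"].any (fun w => PySem.Str.isIn w (pvFieldName field)) then
    cats.modify "client_info" [] (· ++ [field])
  else if ["work order", "date", "time", "year"].any (fun w => PySem.Str.isIn w (pvFieldName field)) then
    cats.modify "work_order" [] (· ++ [field])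
  else if ["sample", "matrix", "grade", "container"].any (fun w => PySem.Str.isIn w (pvFieldName field)) then
    cats.modify "sample_data" [] (· ++ [field])
  else if ["analysis", "parameter", "preservation"].any (fun w => PySem.Str.isIn w (pvFieldName field)) then
    cats.modify "analysis_requests" [] (· ++ [field])
  else if ["hazard", "flammable", "poison", "irritant"].any (fun w => PySem.Str.isIn w (pvFieldName field)) then
    cats.modify "hazards" [] (· ++ [field])
  else if ["filtered", "cooled", "temperature", "flow"].any (fun w => PySem.Str.isIn w (pvFieldName field)) then
    cats.modify "technical" [] (· ++ [field])
  else if ["relinquished", "received", "initials", "page"].any (fun w => PySem.Str.isIn w (pvFieldName field)) then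
    cats.modify "administrative" [] (· ++ [field])
  else if pvFieldType field == "checkbox" then
    cats.modify "checkboxes" [] (· ++ [field])
  else
    cats.modify "other" [] (· ++ [field])

def organize_fields_by_category (fields : List (List (String × String))) : List (String × List (List (String × String))) :=
  (fields.foldl orgStep orgInit).items

-- ===== PORT B =====
def pvKwTable : List (String × List String) :=
  [("headers", ["title", "header", "form", "revision"]),
   ("client_info", ["client", "address", "email", "phone", "po", "project"]),
   ("work_order", ["work order", "date", "time", "year"]),
   ("sample_data", ["sample", "matrix", "grade", "container"]),
   ("analysis_requests", ["analysis", "parameter", "preservation"]),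
   ("hazards", ["hazard", "flammable", "poison", "irritant"]),
   ("technical", ["filtered", "cooled", "temperature", "flow"]),
   ("administrative", ["relinquished", "received", "initials", "page"])]

def pvAllCats : List String :=
  ["headers", "client_info", "work_order", "sample_data", "analysis_requests",
   "hazards", "technical", "administrative", "checkboxes", "other"]

-- the `for cat, words in CATEGORY_KEYWORDS` loop of _classify: first row with a keyword hit
def pvFindCat (name : String) : List (String × List String) → Option String
  | [] => none
  | (c, ws) :: rest =>
    if ws.any (fun w => PySem.Str.isIn w name) then some c else pvFindCat name rest

-- _classify: table lookup, then the checkbox/other fallback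
def pvClassify (field : List (String × String)) : String :=
  match pvFindCat (pvFieldName field) pvKwTable with
  | some c => c
  | none => if pvFieldType field == "checkbox" then "checkboxes" else "other"

def organize_fields_by_category_alt (fields : List (List (String × String))) : List (String × List (List (String × String))) :=
  pvAllCats.map (fun c => (c, fields.filter (fun f => pvClassify f == c)))

-- ===== PRECONDITION & SPEC =====
def Spec_organize_fields_by_category (fields : List (List (String × String))) (out : List (String × List (List (String × String)))) : Prop := out = organize_fields_by_category_alt fields
instance (fields : List (List (String × String))) (out : List (String × List (List (String × String)))) : Decidable (Spec_organize_fields_by_category fields out) := by unfold Spec_organize_fields_by_category; infer_instance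

-- ===== CLAIM (what is proved, stated in full; the proofs are below) =====
def Claim_equal_organize_fields_by_category : Prop := ∀ (fields : List (List (String × String))), Dom_organize_fields_by_category fields → Spec_organize_fields_by_category fields (organize_fields_by_category fields)

-- ===== LEMMAS AND PROOFS =====

-- B's classifier written as the same if/elif ladder A's loop body tests
theorem pvClassify_eq (f : List (String × String)) :
    pvClassify f =
    (if ["title", "header", "form", "revision"].any (fun w => PySem.Str.isIn w (pvFieldName f)) then "headers"
    else if ["client", "address", "email", "phone", "po", "project"].any (fun w => PySem.Str.isIn w (pvFieldName f)) then "client_info"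
    else if ["work order", "date", "time", "year"].any (fun w => PySem.Str.isIn w (pvFieldName f)) then "work_order"
    else if ["sample", "matrix", "grade", "container"].any (fun w => PySem.Str.isIn w (pvFieldName f)) then "sample_data"
    else if ["analysis", "parameter", "preservation"].any (fun w => PySem.Str.isIn w (pvFieldName f)) then "analysis_requests"
    else if ["hazard", "flammable", "poison", "irritant"].any (fun w => PySem.Str.isIn w (pvFieldName f)) then "hazards"
    else if ["filtered", "cooled", "temperature", "flow"].any (fun w => PySem.Str.isIn w (pvFieldName f)) then "technical"
    else if ["relinquished", "received", "initials", "page"].any (fun w => PySem.Str.isIn w (pvFieldName f)) then "administrative"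
    else if pvFieldType f == "checkbox" then "checkboxes"
    else "other") := by
  unfold pvClassify pvKwTable
  simp only [pvFindCat]
  split_ifs <;> rfl

-- A's ladder picks exactly the bucket B's classifier names
theorem orgStep_eq' (cats : PySem.Dict String (List (List (String × String))))
    (f : List (String × String)) :
    orgStep cats f = cats.modify (pvClassify f) [] (· ++ [f]) := by
  rw [pvClassify_eq]
  unfold orgStep
  split_ifs <;> rfl

-- the classifier only ever returns one of the ten bucket names
theorem pvClassify_mem (f : List (String × String)) : pvClassify f ∈ pvAllCats := by
  rw [pvClassify_eq]
  split_ifs <;> simp [pvAllCats]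

-- computing `categories[c].append(field)` on the ten-bucket dict, one lemma per bucket
theorem pvMod_headers (l1 l2 l3 l4 l5 l6 l7 l8 l9 l10 : List (List (String × String)))
    (f : List (String × String)) :
    (PySem.Dict.mk [("headers", l1), ("client_info", l2), ("work_order", l3), ("sample_data", l4), ("analysis_requests", l5), ("hazards", l6), ("technical", l7), ("administrative", l8), ("checkboxes", l9), ("other", l10)]).modify "headers" [] (· ++ [f]) =
    PySem.Dict.mk [("headers", l1 ++ [f]), ("client_info", l2), ("work_order", l3), ("sample_data", l4), ("analysis_requests", l5), ("hazards", l6), ("technical", l7), ("administrative", l8), ("checkboxes", l9), ("other", l10)] := by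
  simp [PySem.Dict.modify, PySem.Dict.contains, PySem.Dict.insert, PySem.Dict.getD, PySem.Dict.get?]

theorem pvMod_client_info (l1 l2 l3 l4 l5 l6 l7 l8 l9 l10 : List (List (String × String)))
    (f : List (String × String)) :
    (PySem.Dict.mk [("headers", l1), ("client_info", l2), ("work_order", l3), ("sample_data", l4), ("analysis_requests", l5), ("hazards", l6), ("technical", l7), ("administrative", l8), ("checkboxes", l9), ("other", l10)]).modify "client_info" [] (· ++ [f]) =
    PySem.Dict.mk [("headers", l1), ("client_info", l2 ++ [f]), ("work_order", l3), ("sample_data", l4), ("analysis_requests", l5), ("hazards", l6), ("technical", l7), ("administrative", l8), ("checkboxes", l9), ("other", l10)] := by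
  simp [PySem.Dict.modify, PySem.Dict.contains, PySem.Dict.insert, PySem.Dict.getD, PySem.Dict.get?]

theorem pvMod_work_order (l1 l2 l3 l4 l5 l6 l7 l8 l9 l10 : List (List (String × String)))
    (f : List (String × String)) :
    (PySem.Dict.mk [("headers", l1), ("client_info", l2), ("work_order", l3), ("sample_data", l4), ("analysis_requests", l5), ("hazards", l6), ("technical", l7), ("administrative", l8), ("checkboxes", l9), ("other", l10)]).modify "work_order" [] (· ++ [f]) =
    PySem.Dict.mk [("headers", l1), ("client_info", l2), ("work_order", l3 ++ [f]), ("sample_data", l4), ("analysis_requests", l5), ("hazards", l6), ("technical", l7), ("administrative", l8), ("checkboxes", l9), ("other", l10)] := by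
  simp [PySem.Dict.modify, PySem.Dict.contains, PySem.Dict.insert, PySem.Dict.getD, PySem.Dict.get?]

theorem pvMod_sample_data (l1 l2 l3 l4 l5 l6 l7 l8 l9 l10 : List (List (String × String)))
    (f : List (String × String)) :
    (PySem.Dict.mk [("headers", l1), ("client_info", l2), ("work_order", l3), ("sample_data", l4), ("analysis_requests", l5), ("hazards", l6), ("technical", l7), ("administrative", l8), ("checkboxes", l9), ("other", l10)]).modify "sample_data" [] (· ++ [f]) =
    PySem.Dict.mk [("headers", l1), ("client_info", l2), ("work_order", l3), ("sample_data", l4 ++ [f]), ("analysis_requests", l5), ("hazards", l6), ("technical", l7), ("administrative", l8), ("checkboxes", l9), ("other", l10)] := by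
  simp [PySem.Dict.modify, PySem.Dict.contains, PySem.Dict.insert, PySem.Dict.getD, PySem.Dict.get?]

theorem pvMod_analysis_requests (l1 l2 l3 l4 l5 l6 l7 l8 l9 l10 : List (List (String × String)))
    (f : List (String × String)) :
    (PySem.Dict.mk [("headers", l1), ("client_info", l2), ("work_order", l3), ("sample_data", l4), ("analysis_requests", l5), ("hazards", l6), ("technical", l7), ("administrative", l8), ("checkboxes", l9), ("other", l10)]).modify "analysis_requests" [] (· ++ [f]) =
    PySem.Dict.mk [("headers", l1), ("client_info", l2), ("work_order", l3), ("sample_data", l4), ("analysis_requests", l5 ++ [f]), ("hazards", l6), ("technical", l7), ("administrative", l8), ("checkboxes", l9), ("other", l10)] := by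
  simp [PySem.Dict.modify, PySem.Dict.contains, PySem.Dict.insert, PySem.Dict.getD, PySem.Dict.get?]

theorem pvMod_hazards (l1 l2 l3 l4 l5 l6 l7 l8 l9 l10 : List (List (String × String)))
    (f : List (String × String)) :
    (PySem.Dict.mk [("headers", l1), ("client_info", l2), ("work_order", l3), ("sample_data", l4), ("analysis_requests", l5), ("hazards", l6), ("technical", l7), ("administrative", l8), ("checkboxes", l9), ("other", l10)]).modify "hazards" [] (· ++ [f]) =
    PySem.Dict.mk [("headers", l1), ("client_info", l2), ("work_order", l3), ("sample_data", l4), ("analysis_requests", l5), ("hazards", l6 ++ [f]), ("technical", l7), ("administrative", l8), ("checkboxes", l9), ("other", l10)] := by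
  simp [PySem.Dict.modify, PySem.Dict.contains, PySem.Dict.insert, PySem.Dict.getD, PySem.Dict.get?]

theorem pvMod_technical (l1 l2 l3 l4 l5 l6 l7 l8 l9 l10 : List (List (String × String)))
    (f : List (String × String)) :
    (PySem.Dict.mk [("headers", l1), ("client_info", l2), ("work_order", l3), ("sample_data", l4), ("analysis_requests", l5), ("hazards", l6), ("technical", l7), ("administrative", l8), ("checkboxes", l9), ("other", l10)]).modify "technical" [] (· ++ [f]) =
    PySem.Dict.mk [("headers", l1), ("client_info", l2), ("work_order", l3), ("sample_data", l4), ("analysis_requests", l5), ("hazards", l6), ("technical", l7 ++ [f]), ("administrative", l8), ("checkboxes", l9), ("other", l10)] := by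
  simp [PySem.Dict.modify, PySem.Dict.contains, PySem.Dict.insert, PySem.Dict.getD, PySem.Dict.get?]

theorem pvMod_administrative (l1 l2 l3 l4 l5 l6 l7 l8 l9 l10 : List (List (String × String)))
    (f : List (String × String)) :
    (PySem.Dict.mk [("headers", l1), ("client_info", l2), ("work_order", l3), ("sample_data", l4), ("analysis_requests", l5), ("hazards", l6), ("technical", l7), ("administrative", l8), ("checkboxes", l9), ("other", l10)]).modify "administrative" [] (· ++ [f]) =
    PySem.Dict.mk [("headers", l1), ("client_info", l2), ("work_order", l3), ("sample_data", l4), ("analysis_requests", l5), ("hazards", l6), ("technical", l7), ("administrative", l8 ++ [f]), ("checkboxes", l9), ("other", l10)] := by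
  simp [PySem.Dict.modify, PySem.Dict.contains, PySem.Dict.insert, PySem.Dict.getD, PySem.Dict.get?]

theorem pvMod_checkboxes (l1 l2 l3 l4 l5 l6 l7 l8 l9 l10 : List (List (String × String)))
    (f : List (String × String)) :
    (PySem.Dict.mk [("headers", l1), ("client_info", l2), ("work_order", l3), ("sample_data", l4), ("analysis_requests", l5), ("hazards", l6), ("technical", l7), ("administrative", l8), ("checkboxes", l9), ("other", l10)]).modify "checkboxes" [] (· ++ [f]) =
    PySem.Dict.mk [("headers", l1), ("client_info", l2), ("work_order", l3), ("sample_data", l4), ("analysis_requests", l5), ("hazards", l6), ("technical", l7), ("administrative", l8), ("checkboxes", l9 ++ [f]), ("other", l10)] := by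
  simp [PySem.Dict.modify, PySem.Dict.contains, PySem.Dict.insert, PySem.Dict.getD, PySem.Dict.get?]

theorem pvMod_other (l1 l2 l3 l4 l5 l6 l7 l8 l9 l10 : List (List (String × String)))
    (f : List (String × String)) :
    (PySem.Dict.mk [("headers", l1), ("client_info", l2), ("work_order", l3), ("sample_data", l4), ("analysis_requests", l5), ("hazards", l6), ("technical", l7), ("administrative", l8), ("checkboxes", l9), ("other", l10)]).modify "other" [] (· ++ [f]) =
    PySem.Dict.mk [("headers", l1), ("client_info", l2), ("work_order", l3), ("sample_data", l4), ("analysis_requests", l5), ("hazards", l6), ("technical", l7), ("administrative", l8), ("checkboxes", l9), ("other", l10 ++ [f])] := by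
  simp [PySem.Dict.modify, PySem.Dict.contains, PySem.Dict.insert, PySem.Dict.getD, PySem.Dict.get?]

theorem org_fold (fields : List (List (String × String)))
    (l1 l2 l3 l4 l5 l6 l7 l8 l9 l10 : List (List (String × String))) :
    (fields.foldl orgStep (PySem.Dict.mk [("headers", l1), ("client_info", l2), ("work_order", l3), ("sample_data", l4), ("analysis_requests", l5), ("hazards", l6), ("technical", l7), ("administrative", l8), ("checkboxes", l9), ("other", l10)])).items =
    [("headers", l1 ++ fields.filter (fun g => pvClassify g == "headers")),
     ("client_info", l2 ++ fields.filter (fun g => pvClassify g == "client_info")),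
     ("work_order", l3 ++ fields.filter (fun g => pvClassify g == "work_order")),
     ("sample_data", l4 ++ fields.filter (fun g => pvClassify g == "sample_data")),
     ("analysis_requests", l5 ++ fields.filter (fun g => pvClassify g == "analysis_requests")),
     ("hazards", l6 ++ fields.filter (fun g => pvClassify g == "hazards")),
     ("technical", l7 ++ fields.filter (fun g => pvClassify g == "technical")),
     ("administrative", l8 ++ fields.filter (fun g => pvClassify g == "administrative")),
     ("checkboxes", l9 ++ fields.filter (fun g => pvClassify g == "checkboxes")),
     ("other", l10 ++ fields.filter (fun g => pvClassify g == "other"))] := by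
  induction fields generalizing l1 l2 l3 l4 l5 l6 l7 l8 l9 l10 with
  | nil => simp
  | cons f fs ih =>
    have hmem := pvClassify_mem f
    simp only [pvAllCats, List.mem_cons, List.not_mem_nil, or_false] at hmem
    rcases hmem with h | h | h | h | h | h | h | h | h | h
    · rw [List.foldl_cons, orgStep_eq', h, pvMod_headers, ih]
      simp [h]
    · rw [List.foldl_cons, orgStep_eq', h, pvMod_client_info, ih]
      simp [h]
    · rw [List.foldl_cons, orgStep_eq', h, pvMod_work_order, ih]
      simp [h]
    · rw [List.foldl_cons, orgStep_eq', h, pvMod_sample_data, ih]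
      simp [h]
    · rw [List.foldl_cons, orgStep_eq', h, pvMod_analysis_requests, ih]
      simp [h]
    · rw [List.foldl_cons, orgStep_eq', h, pvMod_hazards, ih]
      simp [h]
    · rw [List.foldl_cons, orgStep_eq', h, pvMod_technical, ih]
      simp [h]
    · rw [List.foldl_cons, orgStep_eq', h, pvMod_administrative, ih]
      simp [h]
    · rw [List.foldl_cons, orgStep_eq', h, pvMod_checkboxes, ih]
      simp [h]
    · rw [List.foldl_cons, orgStep_eq', h, pvMod_other, ih]
      simp [h]

-- ===== VERDICT (by name: the statement is the Claim_ definition above) =====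
theorem organize_fields_by_category_spec : Claim_equal_organize_fields_by_category := by
  intro fields _
  unfold Spec_organize_fields_by_category organize_fields_by_category organize_fields_by_category_alt orgInit
  rw [org_fold]
  simp [pvAllCats]
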